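-- pv_equiv track=rewrite | github.com/bunceandbean/advent-of-code | 2016/day04/main.py | checks
-- ===== SOURCE A (Python) =====
-- import string
--
-- alpha = list(string.ascii_lowercase)
--
-- def checks(line):
--     freq = []
--     checksum = ""
--     model = line[line.index('[')+1:len(line)-1]
--     for i in range(len(alpha)):
--         freq.append(line.count(alpha[i]))
--     for i in range(max(freq),0,-1):
--         for j in range(len(freq)):
--             if freq[j] == i:
--                 if len(checksum) >= 5:
--                     return checksum == model
--                 checksum += alpha[j]
--     return checksum == model
-- ===== SOURCE B (Python) =====
-- import string
--
-- def checks(line):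
--     model = line[line.index('[')+1:len(line)-1]
--     present = [c for c in string.ascii_lowercase if c in line]
--     # combined key: higher count first (128 > any ord spread), ties by ord ascending
--     ranked = sorted(present, key=lambda c: ord(c) - 128 * line.count(c))
--     return "".join(ranked[:5]) == model
-- ===== Notes on version B (the rewrite author's own statement) =====
-- stated objective: simpler
-- what changed: replaces A's 26-count table plus max-down-to-1 descending rescan with early return by one stable sort of the present letters under a combined (count-desc, letter-asc) key, then comparing the first five to the bracketed checksum
import Mathlib
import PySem

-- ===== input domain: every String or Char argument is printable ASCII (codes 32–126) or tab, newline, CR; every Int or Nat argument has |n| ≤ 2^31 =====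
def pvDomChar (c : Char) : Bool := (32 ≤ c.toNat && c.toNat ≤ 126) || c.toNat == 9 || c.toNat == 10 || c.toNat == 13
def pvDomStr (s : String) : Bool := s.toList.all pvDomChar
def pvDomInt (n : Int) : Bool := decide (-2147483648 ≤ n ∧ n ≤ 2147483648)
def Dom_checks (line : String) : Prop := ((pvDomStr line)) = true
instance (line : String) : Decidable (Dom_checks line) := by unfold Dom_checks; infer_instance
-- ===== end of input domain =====

-- B replaces A's max-down-to-1 descending rescan by one stable sort of the present letters
-- under a combined (count-descending, letter-ascending) integer key; objective: simpler.

-- ===== PORT A =====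
-- alpha = list(string.ascii_lowercase)
def pvAlpha : List Char :=
  ['a','b','c','d','e','f','g','h','i','j','k','l','m','n','o','p','q','r','s','t','u','v','w','x','y','z']

-- inner 'for j in range(len(freq))' with the early 'return checksum == model'
def checksInner (freq : List Int) (i : Int) (model : List Char) :
    List Int → List Char → (List Char) ⊕ Bool
  | [], cs => Sum.inl cs
  | j :: js, cs =>
    if PySem.List.pyGetD freq j 0 == i then
      if 5 ≤ cs.length then Sum.inr (cs == model)
      else checksInner freq i model js (cs ++ [PySem.List.pyGetD pvAlpha j 'a'])
    else checksInner freq i model js cs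

-- outer 'for i in range(max(freq), 0, -1)'
def checksOuter (freq : List Int) (model : List Char) : List Int → List Char → Bool
  | [], cs => cs == model
  | i :: is, cs =>
    match checksInner freq i model (PySem.List.pyRange 0 (freq.length : Int) 1) cs with
    | Sum.inl cs' => checksOuter freq model is cs'
    | Sum.inr b => b

def checks (line : String) : Bool :=
  let s := line.toList
  let model := PySem.Chars.slice s (some (PySem.Chars.find s ['['] + 1)) (some ((s.length : Int) - 1))
  let freq : List Int := (PySem.List.pyRange 0 (pvAlpha.length : Int) 1).foldl
    (fun acc i => acc ++ [(PySem.Chars.count s [PySem.List.pyGetD pvAlpha i 'a'] : Int)]) []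
  -- max(freq): freq always has 26 entries, so the .getD default is never used
  let maxf := (PySem.List.max? freq (fun x => x)).getD 0
  checksOuter freq model (PySem.List.pyRange maxf 0 (-1)) []

-- ===== PORT B =====
def checks_alt (line : String) : Bool :=
  let s := line.toList
  let model := PySem.Chars.slice s (some (PySem.Chars.find s ['['] + 1)) (some ((s.length : Int) - 1))
  let present := pvAlpha.filter (fun c => PySem.Chars.isIn [c] s)
  let ranked := PySem.List.sorted present
    (fun c => (c.toNat : Int) - 128 * (PySem.Chars.count s [c] : Int))
  ranked.take 5 == model

-- ===== PRECONDITION & SPEC =====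
-- A raises ValueError from line.index('[') when the line has no '['; excluded here.
def Pre_checks (line : String) : Prop := PySem.Str.isIn "[" line = true
instance (line : String) : Decidable (Pre_checks line) := by unfold Pre_checks; infer_instance
def pvWitness_checks : String := "ab[ab]"

def Spec_checks (line : String) (out : Bool) : Prop := out = checks_alt line
instance (line : String) (out : Bool) : Decidable (Spec_checks line out) := by unfold Spec_checks; infer_instance

-- ===== CLAIM (what is proved, stated in full; the proofs are below) =====
def Claim_equal_checks : Prop := ∀ (line : String), Dom_checks line → Pre_checks line → Spec_checks line (checks line)

-- ===== LEMMAS AND PROOFS =====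

def pvCnt (s : List Char) (c : Char) : Int := (PySem.Chars.count s [c] : Int)
def pvKey (s : List Char) (c : Char) : Int := (c.toNat : Int) - 128 * pvCnt s c
def pvBucket (s : List Char) (i : Int) : List Char := pvAlpha.filter (fun c => pvCnt s c == i)

-- PySem.Chars.count of a single character is List.count
theorem count_go_singleton (c : Char) (l : List Char) (acc fuel : Nat) (h : l.length ≤ fuel) :
    PySem.Chars.count.go [c] fuel l acc = acc + l.count c := by
  induction l generalizing acc fuel with
  | nil => cases fuel <;> simp [PySem.Chars.count.go.eq_def]
  | cons a t ih =>
    cases fuel with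
    | zero => simp at h
    | succ k =>
      rw [PySem.Chars.count.go.eq_def]
      simp only [List.length_cons] at h
      by_cases hac : a = c
      · subst hac
        simp only [List.isPrefixOf, BEq.rfl, Bool.true_and, if_pos]
        simp only [List.length_cons, List.length_nil, Nat.zero_add, List.drop_succ_cons,
          List.drop_zero]
        rw [ih (acc + 1) k (by omega)]
        rw [List.count_cons_self]
        omega
      · simp only [List.isPrefixOf, ih acc k (by omega : t.length ≤ k)]
        rw [if_neg (by simp only [beq_iff_eq, Bool.and_true]; exact fun hh => hac hh.symm)]
        simp only [List.count_cons, beq_iff_eq]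
        rw [if_neg (fun hh => hac hh)]
        omega

theorem count_singleton (s : List Char) (c : Char) :
    PySem.Chars.count s [c] = s.count c := by
  simp [PySem.Chars.count, count_go_singleton c s 0 s.length le_rfl]

-- spec of the inner loop
theorem inner_spec (freq : List Int) (i : Int) (model : List Char)
    (js : List Int) (cs : List Char) (h : cs.length ≤ 5) :
    checksInner freq i model js cs =
      (if cs.length + ((js.filter (fun j => PySem.List.pyGetD freq j 0 == i)).map
          (fun j => PySem.List.pyGetD pvAlpha j 'a')).length ≤ 5
       then Sum.inl (cs ++ (js.filter (fun j => PySem.List.pyGetD freq j 0 == i)).map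
          (fun j => PySem.List.pyGetD pvAlpha j 'a'))
       else Sum.inr ((cs ++ (js.filter (fun j => PySem.List.pyGetD freq j 0 == i)).map
          (fun j => PySem.List.pyGetD pvAlpha j 'a')).take 5 == model)) := by
  induction js generalizing cs with
  | nil => simp [checksInner, h]
  | cons j js ih =>
    simp only [checksInner]
    by_cases hc : (PySem.List.pyGetD freq j 0 == i) = true
    · rw [if_pos hc, List.filter_cons_of_pos (p := fun j => PySem.List.pyGetD freq j 0 == i) hc]
      simp only [List.map_cons, List.length_cons]
      by_cases h5 : 5 ≤ cs.length
      · rw [if_pos h5]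
        have hlen : cs.length = 5 := le_antisymm h h5
        rw [if_neg (by omega)]
        rw [List.take_append]
        simp [hlen, List.take_of_length_le]
      · rw [if_neg h5]
        rw [ih (cs ++ [PySem.List.pyGetD pvAlpha j 'a']) (by simp; omega)]
        have e1 : (cs ++ [PySem.List.pyGetD pvAlpha j 'a']) ++
            (js.filter (fun j => PySem.List.pyGetD freq j 0 == i)).map
              (fun j => PySem.List.pyGetD pvAlpha j 'a')
            = cs ++ PySem.List.pyGetD pvAlpha j 'a' ::
              (js.filter (fun j => PySem.List.pyGetD freq j 0 == i)).map
                (fun j => PySem.List.pyGetD pvAlpha j 'a') := by simp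
        have e2 : (cs ++ [PySem.List.pyGetD pvAlpha j 'a']).length +
            ((js.filter (fun j => PySem.List.pyGetD freq j 0 == i)).map
              (fun j => PySem.List.pyGetD pvAlpha j 'a')).length
            = cs.length + (((js.filter (fun j => PySem.List.pyGetD freq j 0 == i)).map
              (fun j => PySem.List.pyGetD pvAlpha j 'a')).length + 1) := by
          simp; omega
        rw [e1, e2]
    · rw [if_neg hc, List.filter_cons_of_neg (p := fun j => PySem.List.pyGetD freq j 0 == i) (by simpa using hc)]
      exact ih cs h

-- spec of the outer loop
theorem outer_spec (freq : List Int) (model : List Char) (is : List Int)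
    (cs : List Char) (h : cs.length ≤ 5) :
    checksOuter freq model is cs =
      ((cs ++ is.flatMap (fun i =>
          ((PySem.List.pyRange 0 (freq.length : Int) 1).filter
              (fun j => PySem.List.pyGetD freq j 0 == i)).map
            (fun j => PySem.List.pyGetD pvAlpha j 'a'))).take 5 == model) := by
  induction is generalizing cs with
  | nil => simp [checksOuter, List.take_of_length_le h]
  | cons i is ih =>
    simp only [checksOuter]
    rw [inner_spec freq i model _ cs h]
    set q := ((PySem.List.pyRange 0 (freq.length : Int) 1).filter
        (fun j => PySem.List.pyGetD freq j 0 == i)).map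
        (fun j => PySem.List.pyGetD pvAlpha j 'a') with hqdef
    by_cases hq : cs.length + q.length ≤ 5
    · rw [if_pos hq]
      refine (ih (cs ++ q) (by simp at hq ⊢; omega)).trans ?_
      simp only [List.flatMap_cons, ← hqdef, ← List.append_assoc]
    · rw [if_neg hq]
      show ((cs ++ q).take 5 == model) = _
      simp only [List.flatMap_cons, ← hqdef, ← List.append_assoc]
      rw [List.take_append (l₁ := cs ++ q)]
      have h0 : 5 - (cs ++ q).length = 0 := by simp at hq ⊢; omega
      rw [h0]
      simp

-- indices-to-elements form of a filtered scan
theorem range_filter_map_getD {a : Type} (l : List a) (d : a) (p : a → Bool) :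
    ((List.range l.length).filter (fun k => p (l.getD k d))).map (fun k => l.getD k d)
      = l.filter p := by
  induction l with
  | nil => simp
  | cons a t ih =>
    simp only [List.length_cons, List.range_succ_eq_map, List.filter_cons,
      List.getD_cons_zero]
    rw [List.filter_map]
    have hcomp1 : ((fun k => p ((a :: t).getD k d)) ∘ Nat.succ) = fun k => p (t.getD k d) := by
      funext k; simp
    have hcomp2 : ((fun k => (a :: t).getD k d) ∘ Nat.succ) = fun k => t.getD k d := by
      funext k; simp
    rw [hcomp1]
    by_cases hpa : p a = true
    · simp only [hpa, if_true, List.map_cons, List.getD_cons_zero, List.map_map]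
      rw [hcomp2, ih]
    · simp only [hpa, if_false, Bool.false_eq_true, List.map_map]
      rw [hcomp2, ih]

-- the j-bucket over indices is the letter bucket
theorem bucket_eq (s : List Char) (i : Int) :
    ((PySem.List.pyRange 0 ((pvAlpha.map (pvCnt s)).length : Int) 1).filter
        (fun j => PySem.List.pyGetD (pvAlpha.map (pvCnt s)) j 0 == i)).map
      (fun j => PySem.List.pyGetD pvAlpha j 'a') = pvBucket s i := by
  have hlen : ((pvAlpha.map (pvCnt s)).length : Int) = ((26 : Nat) : Int) := by
    simp [pvAlpha]
  rw [hlen, PySem.List.pyRange_zero_natCast 26]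
  rw [List.filter_map, List.map_map]
  have h1 : ((fun j => PySem.List.pyGetD (pvAlpha.map (pvCnt s)) j 0 == i) ∘
      (fun k : Nat => (k : Int))) = fun k : Nat => (pvAlpha.map (pvCnt s)).getD k 0 == i := by
    funext k; simp [Function.comp, PySem.List.pyGetD_natCast]
  have h2 : ((fun j => PySem.List.pyGetD pvAlpha j 'a') ∘ (fun k : Nat => (k : Int)))
      = fun k : Nat => pvAlpha.getD k 'a' := by
    funext k; simp [Function.comp, PySem.List.pyGetD_natCast]
  rw [h1, h2]
  have h3 : ∀ k ∈ List.range 26, ((pvAlpha.map (pvCnt s)).getD k 0 == i)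
      = ((fun c => pvCnt s c == i) (pvAlpha.getD k 'a')) := by
    intro k hk
    have hk' : k < pvAlpha.length := by simpa [pvAlpha] using List.mem_range.mp hk
    rw [List.getD_eq_getElem _ _ (by simpa using hk'), List.getElem_map,
      List.getD_eq_getElem _ _ hk']
  rw [List.filter_congr h3]
  have h26 : List.range 26 = List.range pvAlpha.length := rfl
  rw [h26, range_filter_map_getD pvAlpha 'a' (fun c => pvCnt s c == i)]
  rfl

theorem filter_disjoint_perm {a : Type} (l : List a) (p q : a → Bool)
    (hd : ∀ x, ¬(p x = true ∧ q x = true)) :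
    (l.filter p ++ l.filter q).Perm (l.filter (fun x => p x || q x)) := by
  induction l with
  | nil => simp
  | cons a t ih =>
    simp only [List.filter_cons]
    by_cases hp : p a = true
    · have hq : q a = false := by
        by_contra hq'
        exact hd a ⟨hp, by simpa using hq'⟩
      simp only [hp, hq, Bool.true_or, if_true, List.cons_append]
      exact ih.cons a
    · by_cases hq : q a = true
      · simp only [hp, hq, Bool.false_or, if_true, Bool.false_eq_true, if_false]
        exact List.perm_middle.trans (ih.cons a)
      · simp only [hp, hq, Bool.false_or, Bool.false_eq_true, if_false]
        exact ih

theorem flat_buckets_perm {a : Type} (I : List Int) (hI : I.Nodup) (l : List a) (h : a → Int) :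
    (I.flatMap (fun i => l.filter (fun c => h c == i))).Perm
      (l.filter (fun c => decide (h c ∈ I))) := by
  induction I with
  | nil => simp
  | cons i I' ih =>
    have hnotin : i ∉ I' := (List.nodup_cons.mp hI).1
    have hnd : I'.Nodup := (List.nodup_cons.mp hI).2
    simp only [List.flatMap_cons]
    have hcong : ∀ c ∈ l, (decide (h c ∈ i :: I'))
        = ((fun x => (h x == i) || decide (h x ∈ I')) c) := by
      intro c _
      simp [List.mem_cons, beq_eq_decide]
    rw [List.filter_congr hcong]
    refine (List.Perm.append_left _ (ih hnd)).trans ?_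
    refine filter_disjoint_perm l (fun c => h c == i) (fun c => decide (h c ∈ I')) ?_
    intro x hx
    exact hnotin (by rw [← beq_iff_eq.mp hx.1]; exact of_decide_eq_true hx.2)

theorem alpha_pairwise_toNat : List.Pairwise (fun a b => a.toNat < b.toNat) pvAlpha := by
  decide

theorem alpha_bounds : ∀ c ∈ pvAlpha, 97 ≤ c.toNat ∧ c.toNat ≤ 122 := by
  intro c hc
  simp only [pvAlpha, List.mem_cons, List.not_mem_nil, or_false] at hc
  rcases hc with rfl|rfl|rfl|rfl|rfl|rfl|rfl|rfl|rfl|rfl|rfl|rfl|rfl|rfl|rfl|rfl|rfl|rfl|rfl|rfl|rfl|rfl|rfl|rfl|rfl|rfl <;> decide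

theorem cnt_pos_iff (s : List Char) (c : Char) : 0 < pvCnt s c ↔ c ∈ s := by
  rw [pvCnt, count_singleton, Int.natCast_pos]
  exact List.count_pos_iff

-- the letters with count in range(maxf, 0, -1) are exactly the letters occurring in s
theorem present_eq (s : List Char) (M : Int) (hub : ∀ c ∈ pvAlpha, pvCnt s c ≤ M) :
    pvAlpha.filter (fun c => decide (pvCnt s c ∈ PySem.List.pyRange M 0 (-1)))
      = pvAlpha.filter (fun c => PySem.Chars.isIn [c] s) := by
  refine List.filter_congr ?_
  intro c hc
  by_cases hcs : c ∈ s
  · have h1 : PySem.Chars.isIn [c] s = true := by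
      rw [PySem.Chars.isIn_iff_infix]
      exact (List.singleton_infix_iff c s).mpr hcs
    rw [h1, decide_eq_true_eq, PySem.List.mem_pyRange_neg_one]
    exact ⟨(cnt_pos_iff s c).mpr hcs, hub c hc⟩
  · have h1 : PySem.Chars.isIn [c] s = false := by
      rw [← Bool.not_eq_true, PySem.Chars.isIn_iff_infix]
      exact fun hinf => hcs ((List.singleton_infix_iff c s).mp hinf)
    rw [h1, decide_eq_false_iff_not, PySem.List.mem_pyRange_neg_one]
    intro hmem
    exact absurd ((cnt_pos_iff s c).mp hmem.1) hcs

-- A's descending rescan output is exactly B's sorted list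
theorem sorted_eq_flat_buckets (s : List Char) (M : Int)
    (hub : ∀ c ∈ pvAlpha, pvCnt s c ≤ M) :
    PySem.List.sorted (pvAlpha.filter (fun c => PySem.Chars.isIn [c] s)) (pvKey s)
      = (PySem.List.pyRange M 0 (-1)).flatMap (pvBucket s) := by
  have hIrev : PySem.List.pyRange M 0 (-1) = (PySem.List.pyRange (0 + 1) (M + 1)).reverse :=
    PySem.List.pyRange_neg_one_eq_reverse M 0
  have hInd : (PySem.List.pyRange M 0 (-1)).Nodup := by
    rw [hIrev, List.nodup_reverse]; exact PySem.List.nodup_pyRange_one _ _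
  have hIpw : (PySem.List.pyRange M 0 (-1)).Pairwise (fun a b => b < a) := by
    rw [hIrev, List.pairwise_reverse]; exact PySem.List.pairwise_lt_pyRange_one _ _
  refine PySem.List.sorted_eq_of_perm_of_pairwise_lt _ _ _ ?_ ?_
  · have hp1 := flat_buckets_perm (PySem.List.pyRange M 0 (-1)) hInd pvAlpha (pvCnt s)
    rw [present_eq s M hub] at hp1
    exact hp1
  · rw [List.flatMap_def, List.pairwise_flatten]
    constructor
    · intro l' hl'
      obtain ⟨i, _, rfl⟩ := List.mem_map.mp hl'
      rw [pvBucket, List.pairwise_filter]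
      refine alpha_pairwise_toNat.imp ?_
      intro a b hab ha hb
      have ha' : pvCnt s a = i := beq_iff_eq.mp ha
      have hb' : pvCnt s b = i := beq_iff_eq.mp hb
      simp only [pvKey, ha', hb']
      omega
    · rw [List.pairwise_map]
      refine hIpw.imp ?_
      intro i1 i2 h21 x hx y hy
      rw [pvBucket, List.mem_filter] at hx hy
      have hx2 : pvCnt s x = i1 := beq_iff_eq.mp hx.2
      have hy2 : pvCnt s y = i2 := beq_iff_eq.mp hy.2
      have hbx := alpha_bounds x hx.1
      have hby := alpha_bounds y hy.1
      have hbx' : ((97:Nat):Int) ≤ (x.toNat : Int) ∧ (x.toNat : Int) ≤ ((122:Nat):Int) := by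
        exact_mod_cast hbx
      have hby' : ((97:Nat):Int) ≤ (y.toNat : Int) ∧ (y.toNat : Int) ≤ ((122:Nat):Int) := by
        exact_mod_cast hby
      simp only [pvKey, hx2, hy2]
      omega

-- ===== VERDICT (by name: the statement is the Claim_ definition above) =====
theorem checks_spec : Claim_equal_checks := by
  intro line _dom _pre
  show checks line = checks_alt line
  unfold checks checks_alt
  dsimp only
  have hkey : (fun c => ((c.toNat : Int) - 128 * (PySem.Chars.count line.toList [c] : Int)))
      = pvKey line.toList := rfl
  rw [hkey]
  have hfreq : (PySem.List.pyRange 0 (pvAlpha.length : Int) 1).foldl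
      (fun acc i => acc ++ [(PySem.Chars.count line.toList [PySem.List.pyGetD pvAlpha i 'a'] : Int)]) []
      = pvAlpha.map (pvCnt line.toList) := by
    rw [PySem.List.foldl_append_singleton_eq_map]
    rfl
  rw [hfreq]
  obtain ⟨m, hm⟩ : ∃ m, PySem.List.max? (pvAlpha.map (pvCnt line.toList)) (fun x => x) = some m := by
    cases hmax : PySem.List.max? (pvAlpha.map (pvCnt line.toList)) (fun x => x) with
    | none =>
      exact absurd ((PySem.List.max?_eq_none_iff _ _).mp hmax) (by simp [pvAlpha])
    | some m => exact ⟨m, rfl⟩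
  rw [hm, Option.getD_some]
  have hub : ∀ c ∈ pvAlpha, pvCnt line.toList c ≤ m := by
    intro c hc
    exact PySem.List.max?_isMax hm _ (List.mem_map_of_mem hc)
  rw [outer_spec _ _ _ [] (by simp)]
  simp only [bucket_eq, List.nil_append]
  rw [sorted_eq_flat_buckets line.toList m hub]
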